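-- pv_equiv track=rewrite | github.com/GivcBIManager/NovaSight | backend/app/domains/identity/domain/rules.py | collect_inherited_permissions
-- ===== SOURCE A (Python) =====
-- from typing import Set, FrozenSet, Optional
--
-- def collect_inherited_permissions(
--     role_permissions_map: dict,
--     role_id: str,
--     hierarchy: dict,
--     visited: Optional[Set[str]] = None,
-- ) -> Set[str]:
--     """
--     Recursively collect permissions from a role and its ancestors.
--
--     Args:
--         role_permissions_map: ``{role_id: set_of_permissions}``
--         role_id: The role to start from.
--         hierarchy: ``{child_role_id: [parent_role_ids]}``
--         visited: Guard against cycles.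
--
--     Returns:
--         Union of all permissions in the inheritance chain.
--     """
--     if visited is None:
--         visited = set()
--
--     if role_id in visited:
--         return set()
--     visited.add(role_id)
--
--     perms = set(role_permissions_map.get(role_id, set()))
--
--     for parent_id in hierarchy.get(role_id, []):
--         perms |= collect_inherited_permissions(
--             role_permissions_map, parent_id, hierarchy, visited,
--         )
--
--     return perms
-- ===== SOURCE B (Python) =====
-- from typing import Set, Optional
--
--
-- def collect_inherited_permissions(
--     role_permissions_map: dict,
--     role_id: str,
--     hierarchy: dict,
--     visited: Optional[Set[str]] = None,
-- ) -> Set[str]: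
--     """Iterative DFS with an explicit stack instead of recursion."""
--     if visited is None:
--         visited = set()
--     if role_id in visited:
--         return set()
--     perms: Set[str] = set()
--     stack = [role_id]
--     while stack:
--         role = stack.pop()
--         if role in visited:
--             continue
--         visited.add(role)
--         perms |= set(role_permissions_map.get(role, ()))
--         stack.extend(reversed(hierarchy.get(role, ())))
--     return perms
-- ===== Notes on version B (the rewrite author's own statement) =====
-- stated objective: alternative
-- what changed: Replaces A's recursive DFS (visited threaded through recursive calls with per-role set unions) by an iterative DFS with an explicit worklist stack and a single flat accumulator set, removing recursion entirely.
import Mathlib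
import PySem

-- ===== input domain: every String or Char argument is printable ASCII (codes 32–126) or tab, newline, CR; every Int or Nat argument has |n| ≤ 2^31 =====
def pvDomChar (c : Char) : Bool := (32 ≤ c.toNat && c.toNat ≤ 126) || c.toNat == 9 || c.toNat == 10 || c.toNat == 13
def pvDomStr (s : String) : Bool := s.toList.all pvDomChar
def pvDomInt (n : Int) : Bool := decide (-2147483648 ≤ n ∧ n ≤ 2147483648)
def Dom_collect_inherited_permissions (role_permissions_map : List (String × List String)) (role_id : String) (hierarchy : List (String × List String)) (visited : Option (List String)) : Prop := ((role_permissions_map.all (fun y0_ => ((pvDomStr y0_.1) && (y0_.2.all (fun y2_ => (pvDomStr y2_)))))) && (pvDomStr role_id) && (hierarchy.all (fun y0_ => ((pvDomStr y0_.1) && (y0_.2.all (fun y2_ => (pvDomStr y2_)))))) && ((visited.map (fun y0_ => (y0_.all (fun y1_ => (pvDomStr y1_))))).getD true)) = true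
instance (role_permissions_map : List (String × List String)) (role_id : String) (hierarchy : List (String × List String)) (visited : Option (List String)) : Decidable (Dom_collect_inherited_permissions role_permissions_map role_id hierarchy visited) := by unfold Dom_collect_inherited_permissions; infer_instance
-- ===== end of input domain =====

-- B replaces A's recursive DFS by an iterative explicit-stack DFS (same return value; both ports thread the caller-visible `visited` set, which both Pythons mutate identically).

-- ===== PORT A =====
-- A's recursion, fueled (fuel is only a totalization guard for the cycle-guarded
-- recursion; `none` = fuel ran out, proved unreachable at the fuel the entry passes).
-- State: returns (perms, visited); Python mutates `visited`, here it is threaded.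
mutual
def pvGoA (rpm hier : List (String × List String)) : Nat → String → List String → Option (List String × List String)
  | 0, _, _ => none
  | Nat.succ n, r, v =>
    if r ∈ v then some ([], v)                       -- `if role_id in visited: return set()`
    else
      -- `visited.add(role_id)`; `perms = set(role_permissions_map.get(role_id, set()))`
      pvGoAList rpm hier n ((PySem.Dict.mk hier).getD r [])
        (PySem.Set.ofList ((PySem.Dict.mk rpm).getD r [])) (PySem.Set.add v r)
  termination_by n _ _ => (n, 0)
-- the `for parent_id in hierarchy.get(role_id, [])` loop: `perms |= collect(...)`
def pvGoAList (rpm hier : List (String × List String)) : Nat → List String → List String → List String → Option (List String × List String)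
  | _, [], perms, v => some (perms, v)
  | n, p :: ps, perms, v =>
    match pvGoA rpm hier n p v with
    | none => none
    | some (q, v') => pvGoAList rpm hier n ps (PySem.Set.union perms q) v'
  termination_by n ps _ _ => (n, ps.length + 1)
end

def collect_inherited_permissions (role_permissions_map : List (String × List String)) (role_id : String) (hierarchy : List (String × List String)) (visited : Option (List String)) : List String :=
  let v0 : List String := visited.getD []            -- `if visited is None: visited = set()`
  (((pvGoA role_permissions_map hierarchy ((hierarchy.flatMap Prod.snd).length + 2) role_id v0).getD ([], v0))).1

-- ===== PORT B =====
-- Source B's while loop, fueled (totalization guard only; `none` = fuel ran out, proved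
-- unreachable at the fuel the entry passes). The stack keeps its TOP AT THE HEAD, so
-- `stack.pop()` is taking the head and `stack.extend(reversed(parents))` is `parents ++ stack`.
def pvLoopB (rpm hier : List (String × List String)) : Nat → List String → List String → List String → Option (List String × List String)
  | _, [], v, perms => some (perms, v)               -- `while stack:` exits
  | 0, _ :: _, _, _ => none
  | Nat.succ n, r :: stack, v, perms =>
    if r ∈ v then pvLoopB rpm hier n stack v perms   -- `if role in visited: continue`
    else
      pvLoopB rpm hier n (((PySem.Dict.mk hier).getD r []) ++ stack) (PySem.Set.add v r)
        (PySem.Set.union perms (PySem.Set.ofList ((PySem.Dict.mk rpm).getD r [])))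

-- a provably sufficient fuel for the worklist loop (k bounds each parents list)
def pvFB (k : Nat) : Nat → Nat
  | 0 => 0
  | n + 1 => 1 + (k + 1) * pvFB k n

def collect_inherited_permissions_alt (role_permissions_map : List (String × List String)) (role_id : String) (hierarchy : List (String × List String)) (visited : Option (List String)) : List String :=
  let v0 : List String := visited.getD []            -- `if visited is None: visited = set()`
  if role_id ∈ v0 then []                            -- `if role_id in visited: return set()`
  else
    let L := (hierarchy.flatMap Prod.snd).length
    (((pvLoopB role_permissions_map hierarchy (pvFB L (L + 2)) [role_id] v0 []).getD ([], v0))).1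

-- ===== PRECONDITION & SPEC =====
def Spec_collect_inherited_permissions (role_permissions_map : List (String × List String)) (role_id : String) (hierarchy : List (String × List String)) (visited : Option (List String)) (out : List String) : Prop := out = collect_inherited_permissions_alt role_permissions_map role_id hierarchy visited
instance (role_permissions_map : List (String × List String)) (role_id : String) (hierarchy : List (String × List String)) (visited : Option (List String)) (out : List String) : Decidable (Spec_collect_inherited_permissions role_permissions_map role_id hierarchy visited out) := by unfold Spec_collect_inherited_permissions; infer_instance

-- ===== CLAIM (what is proved, stated in full; the proofs are below) =====
def Claim_equal_collect_inherited_permissions : Prop := ∀ (role_permissions_map : List (String × List String)) (role_id : String) (hierarchy : List (String × List String)) (visited : Option (List String)), Dom_collect_inherited_permissions role_permissions_map role_id hierarchy visited → Spec_collect_inherited_permissions role_permissions_map role_id hierarchy visited (collect_inherited_permissions role_permissions_map role_id hierarchy visited)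

-- ===== LEMMAS AND PROOFS =====

-- every looked-up parents list is one of hierarchy's value lists, so it is short
lemma pvLenGetD (hier : List (String × List String)) (r : String) :
    ((PySem.Dict.mk hier).getD r []).length ≤ (hier.flatMap Prod.snd).length := by
  induction hier with
  | nil => simp [PySem.Dict.getD_eq_get?_getD, PySem.Dict.get?]
  | cons kv rest ih =>
    obtain ⟨k, vs⟩ := kv
    rw [PySem.Dict.getD_eq_get?_getD, PySem.Dict.get?_mk_cons]
    by_cases hk : k == r
    · simp [hk]
    · rw [if_neg (by simp [hk])]
      rw [PySem.Dict.getD_eq_get?_getD] at ih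
      simp only [List.flatMap_cons, List.length_append]
      omega

-- and its elements are among hierarchy's values
lemma pvMemGetD (hier : List (String × List String)) (r p : String)
    (hp : p ∈ (PySem.Dict.mk hier).getD r []) : p ∈ hier.flatMap Prod.snd := by
  induction hier with
  | nil => simp [PySem.Dict.getD_eq_get?_getD, PySem.Dict.get?] at hp
  | cons kv rest ih =>
    obtain ⟨k, vs⟩ := kv
    rw [PySem.Dict.getD_eq_get?_getD, PySem.Dict.get?_mk_cons] at hp
    simp only [List.flatMap_cons, List.mem_append]
    by_cases hk : k == r
    · rw [if_pos hk] at hp; exact Or.inl hp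
    · rw [if_neg (by simp_all)] at hp
      rw [PySem.Dict.getD_eq_get?_getD] at ih
      exact Or.inr (ih hp)

-- dedup-union is reassociable over a duplicate-free middle list
lemma pvUpdateUpdate (s : List String) :
    ∀ (ys t : List String), t.Nodup →
      PySem.Set.update s (PySem.Set.update t ys) = PySem.Set.update s (t ++ ys) := by
  intro ys
  induction ys with
  | nil => intro t _; simp [PySem.Set.update]
  | cons y ys ih =>
    intro t ht
    rw [PySem.Set.update_cons]
    by_cases hy : y ∈ t
    · rw [PySem.Set.add_of_mem hy, ih t ht]
      have h1 : t ++ y :: ys = (t ++ [y]) ++ ys := by simp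
      rw [h1, PySem.Set.update_append, PySem.Set.update_append]
      have h2 : PySem.Set.update s (t ++ [y]) = PySem.Set.update s t := by
        rw [PySem.Set.update_append]
        have h3 : PySem.Set.update (PySem.Set.update s t) [y]
            = PySem.Set.add (PySem.Set.update s t) y := by
          simp [PySem.Set.update]
        rw [h3, PySem.Set.add_of_mem (by rw [PySem.Set.mem_update]; exact Or.inr hy)]
      rw [h2]
    · rw [PySem.Set.add_of_not_mem hy]
      have hnd : (t ++ [y]).Nodup := by
        have h4 := PySem.Set.nodup_add (s := t) (x := y) ht
        rwa [PySem.Set.add_of_not_mem hy] at h4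
      rw [ih (t ++ [y]) hnd]
      simp

-- A's recursion only ever adds to visited, and its perms output has no duplicates
lemma pvSubNodupA (rpm hier : List (String × List String)) :
    ∀ n,
      (∀ r v q v', pvGoA rpm hier n r v = some (q, v') →
        ((∀ x, x ∈ v → x ∈ v') ∧ q.Nodup)) ∧
      (∀ ps perms v q v', perms.Nodup → pvGoAList rpm hier n ps perms v = some (q, v') →
        ((∀ x, x ∈ v → x ∈ v') ∧ q.Nodup)) := by
  intro n
  induction n with
  | zero =>
    constructor
    · intro r v q v' h; simp [pvGoA] at h
    · intro ps
      induction ps with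
      | nil =>
        intro perms v q v' hnd h
        simp [pvGoAList] at h
        exact ⟨fun x hx => h.2 ▸ hx, h.1 ▸ hnd⟩
      | cons p ps _ =>
        intro perms v q v' hnd h
        simp [pvGoAList, pvGoA] at h
  | succ n ihn =>
    have hA : ∀ r v q v', pvGoA rpm hier (n + 1) r v = some (q, v') →
        ((∀ x, x ∈ v → x ∈ v') ∧ q.Nodup) := by
      intro r v q v' h
      rw [pvGoA] at h
      by_cases hr : r ∈ v
      · rw [if_pos hr] at h
        simp only [Option.some.injEq, Prod.mk.injEq] at h
        exact ⟨fun x hx => h.2 ▸ hx, h.1 ▸ List.nodup_nil⟩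
      · rw [if_neg hr] at h
        have h5 := ihn.2 _ _ _ _ _ (PySem.Set.nodup_ofList _) h
        exact ⟨fun x hx => h5.1 x (by rw [PySem.Set.mem_add]; exact Or.inl hx), h5.2⟩
    refine ⟨hA, ?_⟩
    intro ps
    induction ps with
    | nil =>
      intro perms v q v' hnd h
      simp [pvGoAList] at h
      exact ⟨fun x hx => h.2 ▸ hx, h.1 ▸ hnd⟩
    | cons p ps ih =>
      intro perms v q v' hnd h
      rw [pvGoAList] at h
      cases hg : pvGoA rpm hier (n + 1) p v with
      | none => rw [hg] at h; simp at h
      | some pr =>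
        obtain ⟨qp, vp⟩ := pr
        rw [hg] at h
        simp only at h
        have h1 := hA _ _ _ _ hg
        have h2 := ih _ _ _ _ (PySem.Set.nodup_update (s := perms) (xs := qp) hnd) h
        exact ⟨fun x hx => h2.1 x (h1.1 x hx), h2.2⟩

-- not-yet-visited count is antitone in visited
lemma pvMuMono (univ v v' : List String) (hsub : ∀ x, x ∈ v → x ∈ v') :
    (univ.filter (fun x => x ∉ v')).length ≤ (univ.filter (fun x => x ∉ v)).length := by
  rw [← List.countP_eq_length_filter, ← List.countP_eq_length_filter]
  exact List.countP_mono_left (by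
    intro a _ ha
    simp only [decide_eq_true_eq] at ha ⊢
    exact fun hav => ha (hsub a hav))

-- and drops strictly when a fresh member of univ is added
lemma pvMuDrop (univ : List String) (r : String) (v : List String)
    (hru : r ∈ univ) (hrv : r ∉ v) :
    (univ.filter (fun x => x ∉ PySem.Set.add v r)).length
      < (univ.filter (fun x => x ∉ v)).length := by
  induction univ with
  | nil => simp at hru
  | cons y ys ih =>
    simp only [List.filter_cons]
    by_cases hy : y = r
    · subst hy
      have h1 : (decide (y ∉ PySem.Set.add v y)) = false := by
        simp [PySem.Set.mem_add]
      have h2 : (decide (y ∉ v)) = true := by simp [hrv]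
      rw [h1, h2]
      have h3 := pvMuMono ys v (PySem.Set.add v y)
        (fun x hx => by rw [PySem.Set.mem_add]; exact Or.inl hx)
      simp only [Bool.false_eq_true, if_false, if_true]
      simp only [List.length_cons]
      omega
    · have hru' : r ∈ ys := by
        cases hru with
        | head => exact absurd rfl hy
        | tail _ h => exact h
      have ihy := ih hru'
      by_cases hyv : y ∈ v
      · have h1 : (decide (y ∉ PySem.Set.add v r)) = false := by
          simp [PySem.Set.mem_add, hyv]
        have h2 : (decide (y ∉ v)) = false := by simp [hyv]
        rw [h1, h2]
        simpa using ihy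
      · have h1 : (decide (y ∉ PySem.Set.add v r)) = true := by
          simp only [PySem.Set.mem_add, decide_eq_true_eq]
          push Not
          exact ⟨hyv, hy⟩
        have h2 : (decide (y ∉ v)) = true := by simp [hyv]
        rw [h1, h2]
        simp only [if_true]
        simp only [List.length_cons]
        omega

-- fuel sufficiency for A's recursion: the not-yet-visited count bounds the depth
lemma pvSuffA (rpm hier : List (String × List String)) (univ : List String)
    (hpar : ∀ r p, p ∈ (PySem.Dict.mk hier).getD r [] → p ∈ univ) :
    ∀ n,
      (∀ r v, r ∈ univ → (univ.filter (fun x => x ∉ v)).length < n →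
        (pvGoA rpm hier n r v).isSome) ∧
      (∀ ps perms v, (∀ p ∈ ps, p ∈ univ) →
          (univ.filter (fun x => x ∉ v)).length < n →
        (pvGoAList rpm hier n ps perms v).isSome) := by
  intro n
  induction n with
  | zero =>
    constructor
    · intro r v _ h; omega
    · intro ps perms v _ h; omega
  | succ n ihn =>
    have hA : ∀ r v, r ∈ univ → (univ.filter (fun x => x ∉ v)).length < n + 1 →
        (pvGoA rpm hier (n + 1) r v).isSome := by
      intro r v hru hb
      rw [pvGoA]
      by_cases hr : r ∈ v
      · rw [if_pos hr]; rfl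
      · rw [if_neg hr]
        apply ihn.2
        · exact fun p hp => hpar r p hp
        · have h6 := pvMuDrop univ r v hru hr
          omega
    refine ⟨hA, ?_⟩
    intro ps
    induction ps with
    | nil => intro perms v _ _; simp [pvGoAList]
    | cons p ps ih =>
      intro perms v hps hb
      rw [pvGoAList]
      have hg := hA p v (hps p (by simp)) hb
      cases hgv : pvGoA rpm hier (n + 1) p v with
      | none => rw [hgv] at hg; simp at hg
      | some pr =>
        obtain ⟨qp, vp⟩ := pr
        simp only
        have hsub := ((pvSubNodupA rpm hier (n + 1)).1 _ _ _ _ hgv).1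
        exact ih _ _ (fun x hx => hps x (by simp [hx]))
          (lt_of_le_of_lt (pvMuMono univ v vp hsub) hb)

-- B's loop is fuel-monotone
lemma pvMonoB (rpm hier : List (String × List String)) :
    ∀ m m' s v a x, m ≤ m' → pvLoopB rpm hier m s v a = some x →
      pvLoopB rpm hier m' s v a = some x := by
  intro m
  induction m with
  | zero =>
    intro m' s v a x _ h
    cases s with
    | nil => simpa [pvLoopB] using h
    | cons r st => simp [pvLoopB] at h
  | succ m ih =>
    intro m' s v a x hle h
    cases s with
    | nil => simpa [pvLoopB] using h
    | cons r st =>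
      cases m' with
      | zero => omega
      | succ m'' =>
        rw [pvLoopB] at h ⊢
        by_cases hr : r ∈ v
        · rw [if_pos hr] at h ⊢
          exact ih _ _ _ _ _ (by omega) h
        · rw [if_neg hr] at h ⊢
          exact ih _ _ _ _ _ (by omega) h

-- the key simulation: one A-call is a stretch of B-loop steps
lemma pvKey (rpm hier : List (String × List String)) :
    ∀ n,
      (∀ r v q v' rest acc m res, pvGoA rpm hier n r v = some (q, v') →
        pvLoopB rpm hier m rest v' (PySem.Set.union acc q) = some res →
        pvLoopB rpm hier (pvFB (hier.flatMap Prod.snd).length n + m) (r :: rest) v acc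
          = some res) ∧
      (∀ ps perms v q v' rest acc m res, perms.Nodup →
        pvGoAList rpm hier n ps perms v = some (q, v') →
        pvLoopB rpm hier m rest v' (PySem.Set.union acc q) = some res →
        pvLoopB rpm hier (ps.length * pvFB (hier.flatMap Prod.snd).length n + m)
          (ps ++ rest) v (PySem.Set.union acc perms) = some res) := by
  intro n
  induction n with
  | zero =>
    constructor
    · intro r v q v' rest acc m res hg _; simp [pvGoA] at hg
    · intro ps
      induction ps with
      | nil =>
        intro perms v q v' rest acc m res _ hg hl
        simp only [pvGoAList, Option.some.injEq, Prod.mk.injEq] at hg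
        simpa [hg.1, hg.2] using hl
      | cons p ps _ =>
        intro perms v q v' rest acc m res _ hg _
        simp [pvGoAList, pvGoA] at hg
  | succ n ihn =>
    have hA : ∀ r v q v' rest acc m res, pvGoA rpm hier (n + 1) r v = some (q, v') →
        pvLoopB rpm hier m rest v' (PySem.Set.union acc q) = some res →
        pvLoopB rpm hier (pvFB (hier.flatMap Prod.snd).length (n + 1) + m) (r :: rest) v acc
          = some res := by
      intro r v q v' rest acc m res hg hl
      rw [pvGoA] at hg
      have hFB : pvFB (hier.flatMap Prod.snd).length (n + 1) + m
          = (1 + ((hier.flatMap Prod.snd).length + 1) * pvFB (hier.flatMap Prod.snd).length n) + m := by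
        rfl
      by_cases hr : r ∈ v
      · rw [if_pos hr] at hg
        simp only [Option.some.injEq, Prod.mk.injEq] at hg
        obtain ⟨hq, hv⟩ := hg
        subst hq; subst hv
        have hacc : PySem.Set.union acc ([] : List String) = acc := rfl
        rw [hacc] at hl
        rw [hFB]
        have hstep : pvFB (hier.flatMap Prod.snd).length (n + 1) + m
            = Nat.succ (((hier.flatMap Prod.snd).length + 1) * pvFB (hier.flatMap Prod.snd).length n + m) := by
          simp [pvFB]; ring
        rw [← hFB, hstep, pvLoopB, if_pos hr]
        exact pvMonoB rpm hier m _ _ _ _ _ (by omega) hl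
      · rw [if_neg hr] at hg
        have hkey := ihn.2 ((PySem.Dict.mk hier).getD r [])
          (PySem.Set.ofList ((PySem.Dict.mk rpm).getD r [])) (PySem.Set.add v r) q v' rest acc m res
          (PySem.Set.nodup_ofList _) hg hl
        have hstep : pvFB (hier.flatMap Prod.snd).length (n + 1) + m
            = Nat.succ (((hier.flatMap Prod.snd).length + 1) * pvFB (hier.flatMap Prod.snd).length n + m) := by
          simp [pvFB]; ring
        rw [hstep, pvLoopB, if_neg hr]
        apply pvMonoB rpm hier
          (((PySem.Dict.mk hier).getD r []).length * pvFB (hier.flatMap Prod.snd).length n + m) _ _ _ _ _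
          (by
            have h7 : ((PySem.Dict.mk hier).getD r []).length
                ≤ (hier.flatMap Prod.snd).length + 1 := by
              have := pvLenGetD hier r; omega
            have h8 := Nat.mul_le_mul_right (pvFB (hier.flatMap Prod.snd).length n) h7
            omega)
          hkey
    refine ⟨hA, ?_⟩
    intro ps
    induction ps with
    | nil =>
      intro perms v q v' rest acc m res _ hg hl
      simp only [pvGoAList, Option.some.injEq, Prod.mk.injEq] at hg
      simpa [hg.1, hg.2] using hl
    | cons p ps ih =>
      intro perms v q v' rest acc m res hnd hg hl
      rw [pvGoAList] at hg
      cases hgv : pvGoA rpm hier (n + 1) p v with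
      | none => rw [hgv] at hg; simp at hg
      | some pr =>
        obtain ⟨qp, vp⟩ := pr
        rw [hgv] at hg
        simp only at hg
        have hrec := ih (PySem.Set.union perms qp) vp q v' rest acc m res
          (PySem.Set.nodup_update (s := perms) (xs := qp) hnd) hg hl
        have hassoc : PySem.Set.union acc (PySem.Set.union perms qp)
            = PySem.Set.union (PySem.Set.union acc perms) qp := by
          show PySem.Set.update acc (PySem.Set.update perms qp)
              = PySem.Set.update (PySem.Set.update acc perms) qp
          rw [pvUpdateUpdate acc qp perms hnd, PySem.Set.update_append]
        rw [hassoc] at hrec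
        have hfin := hA p v qp vp (ps ++ rest) (PySem.Set.union acc perms)
          (ps.length * pvFB (hier.flatMap Prod.snd).length (n + 1) + m) res hgv hrec
        have harith : pvFB (hier.flatMap Prod.snd).length (n + 1)
              + (ps.length * pvFB (hier.flatMap Prod.snd).length (n + 1) + m)
            = (p :: ps).length * pvFB (hier.flatMap Prod.snd).length (n + 1) + m := by
          simp only [List.length_cons]
          ring
        rw [harith] at hfin
        exact hfin

-- ===== VERDICT (by name: the statement is the Claim_ definition above) =====
theorem collect_inherited_permissions_spec : Claim_equal_collect_inherited_permissions := by
  intro rpm rid hier vis _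
  unfold Spec_collect_inherited_permissions
  simp only [collect_inherited_permissions, collect_inherited_permissions_alt]
  by_cases hv : rid ∈ vis.getD []
  · have hA : pvGoA rpm hier ((hier.flatMap Prod.snd).length + 2) rid (vis.getD [])
        = some ([], vis.getD []) := by
      rw [show (hier.flatMap Prod.snd).length + 2
            = ((hier.flatMap Prod.snd).length + 1) + 1 from rfl, pvGoA, if_pos hv]
    rw [hA, if_pos hv]
    rfl
  · have hsuff := (pvSuffA rpm hier (rid :: hier.flatMap Prod.snd)
      (fun r p hp => List.mem_cons_of_mem _ (pvMemGetD hier r p hp))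
      ((hier.flatMap Prod.snd).length + 2)).1 rid (vis.getD [])
      (List.mem_cons_self)
      (by
        have h1 := List.length_filter_le
          (fun x => decide (x ∉ vis.getD [])) (rid :: hier.flatMap Prod.snd)
        simp only [List.length_cons] at h1
        omega)
    obtain ⟨⟨q, v'⟩, hq⟩ := Option.isSome_iff_exists.mp hsuff
    have hnodup := ((pvSubNodupA rpm hier ((hier.flatMap Prod.snd).length + 2)).1 _ _ _ _ hq).2
    have hbase : pvLoopB rpm hier 0 [] v' (PySem.Set.union [] q)
        = some (PySem.Set.union [] q, v') := rfl
    have hkey := (pvKey rpm hier ((hier.flatMap Prod.snd).length + 2)).1 rid (vis.getD [])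
      q v' [] [] 0 _ hq hbase
    rw [Nat.add_zero] at hkey
    have hu : PySem.Set.union ([] : List String) q = q := by
      show PySem.Set.ofList q = q
      exact PySem.Set.ofList_eq_self_of_nodup _ hnodup
    rw [hu] at hkey
    rw [hq, if_neg hv, hkey]
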